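-- pv_equiv track=rewrite | github.com/OnurKeklik/Qg-Iztech | pntl/tree_kernel.py | syntaxTreeToHtml
-- ===== SOURCE A (Python) =====
-- def syntaxTreeToHtml(raw):
--     newString = ''
--     detect = 0
--     tagStack = []
--     currentDetection = False
--     for i in range (0,len(raw)):
--         if raw[i] == '(':
--             if detect > 0 and len(tagStack) == detect and newString.strip()[-1] != '>':
--                 newString = newString + raw[i].replace(raw[i], "><")
--             else:
--                 newString = newString + raw[i].replace(raw[i], "<")
--
--             tagString = ''
--             idd = i + 1
--             for j in range (idd,len(raw)):
--                 if raw[j] == ' ' or raw[j] == '(' or raw[j] == ')':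
--                     tagStack.append(tagString)
--                     break
--                 else:
--                     tagString = tagString + raw[j]
--             detect = detect + 1
--
--         elif raw[i] == ')':
--             if currentDetection == True:
--                 tagStack.pop()
--                 newString = newString + raw[i].replace(raw[i], ">")
--             else:
--                 newString = newString + "</" + tagStack.pop() + raw[i].replace(raw[i], ">")
--             detect = detect - 1
--             currentDetection = False
--
--         elif raw[i] == ' ':
--             currentDetection = True
--
--         elif currentDetection == False:
--             newString = newString + raw[i]
--     return newString
-- ===== SOURCE B (Python) =====
-- def syntaxTreeToHtml(raw):
--     # Single left-to-right pass: the tag name is collected incrementally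
--     # (no per-'(' lookahead rescan) and the last non-whitespace output char
--     # is tracked instead of recomputing newString.strip()[-1].
--     out = []
--     tagStack = []
--     detect = 0
--     currentDetection = False
--     collecting = False
--     tag = []
--     last = None  # last non-whitespace character appended to out
--     for ch in raw:
--         if collecting and (ch == ' ' or ch == '(' or ch == ')'):
--             tagStack.append(''.join(tag))
--             collecting = False
--         if ch == '(':
--             if detect > 0 and len(tagStack) == detect and last != '>':
--                 out.append('><')
--             else:
--                 out.append('<')
--             last = '<'
--             detect += 1
--             collecting = True
--             tag = []
--         elif ch == ')':
--             if currentDetection: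
--                 tagStack.pop()
--                 out.append('>')
--             else:
--                 out.append('</' + tagStack.pop() + '>')
--             last = '>'
--             detect -= 1
--             currentDetection = False
--         elif ch == ' ':
--             currentDetection = True
--         else:
--             if collecting:
--                 tag.append(ch)
--             if not currentDetection:
--                 out.append(ch)
--                 if not ch.isspace():
--                     last = ch
--     return ''.join(out)
-- ===== Notes on version B (the rewrite author's own statement) =====
-- stated objective: alternative
-- what changed: Replaced A's per-'(' forward rescan for the tag name and repeated newString.strip()[-1] recomputation by a single left-to-right pass that collects the tag incrementally and tracks the last non-whitespace output character.
import Mathlib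
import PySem

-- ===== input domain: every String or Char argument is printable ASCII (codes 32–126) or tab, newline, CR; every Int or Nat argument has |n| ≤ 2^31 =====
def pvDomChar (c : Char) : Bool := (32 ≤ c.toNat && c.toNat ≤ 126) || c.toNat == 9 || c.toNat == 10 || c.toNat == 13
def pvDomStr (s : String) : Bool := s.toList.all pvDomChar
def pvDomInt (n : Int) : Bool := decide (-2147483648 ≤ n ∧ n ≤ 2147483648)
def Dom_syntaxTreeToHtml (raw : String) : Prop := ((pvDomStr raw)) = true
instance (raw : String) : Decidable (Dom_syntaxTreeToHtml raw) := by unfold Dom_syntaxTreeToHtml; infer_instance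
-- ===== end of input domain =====

-- B replaces A's per-'(' lookahead rescan and repeated newString.strip() by a single
-- left-to-right pass that collects the tag incrementally and tracks the last
-- non-whitespace output character (alternative decomposition of the same work).

-- ===== PORT A =====
-- A's inner loop 'for j in range(i+1, len(raw))': first delimiter → push tagString (some t);
-- loop ends without break → no push (none)

def pvScanTag : List Char → List Char → Option (List Char)
  | [], _ => none
  | c :: rest, t =>
    if c == ' ' || c == '(' || c == ')' then some t else pvScanTag rest (t ++ [c])

-- A's outer loop; tagStack.pop() on an empty stack raises IndexError in Python
-- (excluded by Pre_), totalized here with getLast?.getD [] / dropLast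
def pvALoop : List Char → List Char → Int → List (List Char) → Bool → List Char
  | [], ns, _, _, _ => ns
  | c :: rest, ns, detect, stack, cd =>
    if c == '(' then
      let ns' := if 0 < detect ∧ (stack.length : Int) = detect ∧
                    PySem.List.pyGet? (PySem.Chars.strip ns) (-1) ≠ some '>'
                 then ns ++ ['>', '<'] else ns ++ ['<']
      let stack' := match pvScanTag rest [] with
                    | some t => stack ++ [t]
                    | none => stack
      pvALoop rest ns' (detect + 1) stack' cd
    else if c == ')' then
      if cd then
        pvALoop rest (ns ++ ['>']) (detect - 1) stack.dropLast false
      else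
        pvALoop rest (ns ++ ['<', '/'] ++ (stack.getLast?.getD []) ++ ['>'])
          (detect - 1) stack.dropLast false
    else if c == ' ' then
      pvALoop rest ns detect stack true
    else if cd then
      pvALoop rest ns detect stack cd
    else
      pvALoop rest (ns ++ [c]) detect stack cd

def syntaxTreeToHtml (raw : String) : String :=
  String.ofList (pvALoop raw.toList [] 0 [] false)

-- ===== PORT B =====
structure PvBState where
  out : List Char
  stack : List (List Char)
  detect : Int
  cd : Bool
  collecting : Bool
  tag : List Char
  last : Option Char
deriving Repr

def pvBStep (s0 : PvBState) (c : Char) : PvBState :=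
  let s := if s0.collecting && (c == ' ' || c == '(' || c == ')') then
             { s0 with stack := s0.stack ++ [s0.tag], collecting := false }
           else s0
  if c == '(' then
    let piece := if 0 < s.detect ∧ (s.stack.length : Int) = s.detect ∧ s.last ≠ some '>'
                 then ['>', '<'] else ['<']
    { s with out := s.out ++ piece, last := some '<', detect := s.detect + 1,
             collecting := true, tag := [] }
  else if c == ')' then
    let out' := if s.cd then s.out ++ ['>']
                else s.out ++ ['<', '/'] ++ (s.stack.getLast?.getD []) ++ ['>']
    { s with out := out', last := some '>', detect := s.detect - 1,
             cd := false, stack := s.stack.dropLast }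
  else if c == ' ' then
    { s with cd := true }
  else
    let s' := if s.collecting then { s with tag := s.tag ++ [c] } else s
    if s'.cd then s'
    else { s' with out := s'.out ++ [c],
                   last := if PySem.Chars.isspace c then s'.last else some c }


def syntaxTreeToHtml_alt (raw : String) : String :=
  String.ofList (raw.toList.foldl pvBStep ⟨[], [], 0, false, false, [], none⟩).out

-- ===== PRECONDITION & SPEC =====
-- Pre_ excludes exactly the unbalanced strings on which A's tagStack.pop() raises
-- IndexError: some prefix of raw contains more ')' than '('.
def Pre_syntaxTreeToHtml (raw : String) : Prop :=
  ∀ n ∈ List.range (raw.toList.length + 1),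
    (raw.toList.take n).count ')' ≤ (raw.toList.take n).count '('
instance (raw : String) : Decidable (Pre_syntaxTreeToHtml raw) := by
  unfold Pre_syntaxTreeToHtml; infer_instance

def pvWitness_syntaxTreeToHtml : String := "(S (NP (DT the) (NN dog)))"

def Spec_syntaxTreeToHtml (raw : String) (out : String) : Prop := out = syntaxTreeToHtml_alt raw
instance (raw : String) (out : String) : Decidable (Spec_syntaxTreeToHtml raw out) := by unfold Spec_syntaxTreeToHtml; infer_instance

-- ===== CLAIM (what is proved, stated in full; the proofs are below) =====
def Claim_equal_syntaxTreeToHtml : Prop := ∀ (raw : String), Dom_syntaxTreeToHtml raw → Pre_syntaxTreeToHtml raw → Spec_syntaxTreeToHtml raw (syntaxTreeToHtml raw)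

-- ===== LEMMAS AND PROOFS =====

def pvLastNW (ns : List Char) : Option Char :=
  (ns.reverse.dropWhile PySem.Chars.isspace).head?

lemma pvLastNW_append (ns : List Char) (c : Char) :
    pvLastNW (ns ++ [c]) =
      if PySem.Chars.isspace c then pvLastNW ns else some c := by
  simp [pvLastNW, List.dropWhile]
  split_ifs <;> simp_all

lemma pvStrip_getLast? (ns : List Char) :
    (PySem.Chars.strip ns).getLast? = pvLastNW ns := by
  simp only [PySem.Chars.strip, PySem.Chars.rstrip, PySem.Chars.lstrip, pvLastNW,
    List.getLast?_reverse]
  conv_rhs => rw [← List.takeWhile_append_dropWhile (p := PySem.Chars.isspace) (l := ns),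
    List.reverse_append, List.dropWhile_append]
  have h2 : List.dropWhile PySem.Chars.isspace
      (List.takeWhile PySem.Chars.isspace ns).reverse = [] := by
    rw [List.dropWhile_eq_nil_iff]
    intro x hx
    exact List.mem_takeWhile_imp (List.mem_reverse.mp hx)
  rw [h2]
  split_ifs with h
  · simp [List.isEmpty_iff.mp h]
  · rw [List.head?_append]
    cases hh : (List.dropWhile PySem.Chars.isspace (List.dropWhile PySem.Chars.isspace ns).reverse).head? with
    | none => exact absurd (List.head?_eq_none_iff.mp hh) (by simpa [List.isEmpty_iff] using h)
    | some a => simp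

lemma pvCond (ns : List Char) :
    PySem.List.pyGet? (PySem.Chars.strip ns) (-1) = pvLastNW ns := by
  rw [PySem.List.pyGet?_neg_one, pvStrip_getLast?]


lemma pvMain (rest : List Char) (ns : List Char) (detect : Int)
    (stack : List (List Char)) (cd collecting : Bool) (tag : List Char)
    (last : Option Char) (hlast : last = pvLastNW ns) :
    pvALoop rest ns detect
      (if collecting then
        (match pvScanTag rest tag with
         | some t => stack ++ [t]
         | none => stack)
       else stack) cd
    = (List.foldl pvBStep ⟨ns, stack, detect, cd, collecting, tag, last⟩ rest).out := by
  induction rest generalizing ns detect stack cd collecting tag last with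
  | nil => cases collecting <;> simp [pvALoop]
  | cons c rest ih =>
    by_cases h1 : c = '('
    · subst h1
      cases collecting with
      | false =>
        simp only [Bool.false_eq_true, if_false, List.foldl_cons]
        rw [pvALoop, pvCond, ← hlast]
        simp only [pvBStep, show ('(' == ' ') = false from rfl,
          show ('(' == '(') = true from rfl, show ('(' == ')') = false from rfl,
          Bool.false_and, Bool.false_eq_true, if_false, if_true, Bool.true_and,
          Bool.or_true, Bool.true_or, Bool.or_false, Bool.false_or]
        split_ifs with hP
        · exact ih _ (detect + 1) stack cd true [] (some '<')
            (by rw [show ns ++ ['>','<'] = (ns ++ ['>']) ++ ['<'] by simp, pvLastNW_append]; rfl)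
        · exact ih _ (detect + 1) stack cd true [] (some '<') (by rw [pvLastNW_append]; rfl)
      | true =>
        have hs : pvScanTag ('(' :: rest) tag = some tag := by simp [pvScanTag]
        simp only [if_true, List.foldl_cons]
        rw [show (match pvScanTag ('(' :: rest) tag with
             | some t => stack ++ [t] | none => stack) = stack ++ [tag] from by rw [hs]]
        rw [pvALoop, pvCond, ← hlast]
        simp only [pvBStep, show ('(' == ' ') = false from rfl,
          show ('(' == '(') = true from rfl, show ('(' == ')') = false from rfl,
          Bool.false_and, Bool.true_and, Bool.false_eq_true, if_false, if_true,
          Bool.or_true, Bool.true_or, Bool.or_false, Bool.false_or]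
        split_ifs with hP
        · exact ih _ (detect + 1) (stack ++ [tag]) cd true [] (some '<')
            (by rw [show ns ++ ['>','<'] = (ns ++ ['>']) ++ ['<'] by simp, pvLastNW_append]; rfl)
        · exact ih _ (detect + 1) (stack ++ [tag]) cd true [] (some '<')
            (by rw [pvLastNW_append]; rfl)
    · by_cases h2 : c = ')'
      · subst h2
        have hlast2 : ∀ (l xs : List Char), some '>' = pvLastNW (l ++ xs ++ ['>']) := by
          intro l xs
          rw [show l ++ xs ++ ['>'] = (l ++ xs) ++ ['>'] by simp, pvLastNW_append]; rfl
        cases collecting with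
        | false =>
          simp only [Bool.false_eq_true, if_false, List.foldl_cons]
          rw [pvALoop]
          simp only [pvBStep, show (')' == '(') = false from rfl,
            show (')' == ')') = true from rfl, show (')' == ' ') = false from rfl,
            Bool.false_and, Bool.false_eq_true, if_false, if_true, Bool.true_and,
            Bool.or_true, Bool.true_or, Bool.or_false, Bool.false_or]
          cases cd with
          | true =>
            exact ih _ (detect - 1) stack.dropLast false false tag (some '>')
              (by simpa using hlast2 ns [])
          | false =>
            exact ih _ (detect - 1) stack.dropLast false false tag (some '>')
              (by simpa using hlast2 (ns ++ ['<','/']) (stack.getLast?.getD []))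
        | true =>
          have hs : pvScanTag (')' :: rest) tag = some tag := by simp [pvScanTag]
          simp only [if_true, List.foldl_cons]
          rw [show (match pvScanTag (')' :: rest) tag with
               | some t => stack ++ [t] | none => stack) = stack ++ [tag] from by rw [hs]]
          rw [pvALoop]
          simp only [pvBStep, show (')' == '(') = false from rfl,
            show (')' == ')') = true from rfl, show (')' == ' ') = false from rfl,
            Bool.false_and, Bool.true_and, Bool.false_eq_true, if_false, if_true,
            Bool.or_true, Bool.true_or, Bool.or_false, Bool.false_or]
          cases cd with
          | true =>
            exact ih _ (detect - 1) (stack ++ [tag]).dropLast false false tag (some '>')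
              (by simpa using hlast2 ns [])
          | false =>
            exact ih _ (detect - 1) (stack ++ [tag]).dropLast false false tag (some '>')
              (by simpa using hlast2 (ns ++ ['<','/']) ((stack ++ [tag]).getLast?.getD []))
      · by_cases h3 : c = ' '
        · subst h3
          cases collecting with
          | false =>
            simp only [Bool.false_eq_true, if_false, List.foldl_cons]
            rw [pvALoop]
            simp only [pvBStep, show (' ' == '(') = false from rfl,
              show (' ' == ')') = false from rfl, show (' ' == ' ') = true from rfl,
              Bool.false_and, Bool.false_eq_true, if_false, if_true, Bool.true_and,
              Bool.or_true, Bool.true_or, Bool.or_false, Bool.false_or]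
            exact ih ns detect stack true false tag last hlast
          | true =>
            have hs : pvScanTag (' ' :: rest) tag = some tag := by simp [pvScanTag]
            simp only [if_true, List.foldl_cons]
            rw [show (match pvScanTag (' ' :: rest) tag with
                 | some t => stack ++ [t] | none => stack) = stack ++ [tag] from by rw [hs]]
            rw [pvALoop]
            simp only [pvBStep, show (' ' == '(') = false from rfl,
              show (' ' == ')') = false from rfl, show (' ' == ' ') = true from rfl,
              Bool.false_and, Bool.true_and, Bool.false_eq_true, if_false, if_true,
              Bool.or_true, Bool.true_or, Bool.or_false, Bool.false_or]
            exact ih ns detect (stack ++ [tag]) true false tag last hlast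
        · have hb1 : (c == '(') = false := by simp [h1]
          have hb2 : (c == ')') = false := by simp [h2]
          have hb3 : (c == ' ') = false := by simp [h3]
          have hs : pvScanTag (c :: rest) tag = pvScanTag rest (tag ++ [c]) := by
            simp [pvScanTag, hb1, hb2, hb3]
          cases collecting with
          | false =>
            simp only [Bool.false_eq_true, if_false, List.foldl_cons]
            rw [pvALoop]
            simp only [pvBStep, hb1, hb2, hb3, Bool.false_and, Bool.false_eq_true,
              if_false, if_true, Bool.true_and, Bool.or_false, Bool.false_or]
            cases cd with
            | true => exact ih ns detect stack true false tag last hlast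
            | false =>
              exact ih _ detect stack false false tag
                (if PySem.Chars.isspace c then last else some c)
                (by rw [pvLastNW_append, hlast])
          | true =>
            simp only [if_true, List.foldl_cons]
            rw [hs]
            rw [pvALoop]
            simp only [pvBStep, hb1, hb2, hb3, Bool.false_and, Bool.true_and,
              Bool.false_eq_true, if_false, if_true, Bool.or_false, Bool.false_or]
            cases cd with
            | true => exact ih ns detect stack true true (tag ++ [c]) last hlast
            | false =>
              exact ih _ detect stack false true (tag ++ [c])
                (if PySem.Chars.isspace c then last else some c)
                (by rw [pvLastNW_append, hlast])

-- ===== VERDICT (by name: the statement is the Claim_ definition above) =====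
theorem syntaxTreeToHtml_spec : Claim_equal_syntaxTreeToHtml := by
  intro raw _ _
  unfold Spec_syntaxTreeToHtml syntaxTreeToHtml syntaxTreeToHtml_alt
  exact congrArg String.ofList
    (by simpa using pvMain raw.toList [] 0 [] false false [] none rfl)
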